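-- pv_equiv track=rewrite | github.com/guesar2/steane_error_correction | generate_ghz_circuits.py | add_errors_after_gates_recursively
-- ===== SOURCE A (Python) =====
-- def add_errors_after_gates_recursively(affected_gates: list, type_mask: int):
--     one_qubit_errors = ["X"]
--     #one_qubit_errors = ["X", "Y", "Z"]
--     """two_qubit_errors = [
--         "IX", "IY", "IZ", "XI", "YI", "ZI",
--         "XX", "XY", "XZ", "YX", "YY", "YZ",
--         "ZX", "ZY", "ZZ"
--     ]"""
--     two_qubit_errors = ["IX", "XI", "XX"]
--     # Base case: only one gate
--     if len(affected_gates) == 1: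
--         gate_type = (type_mask >> affected_gates[0]) & 1
--         if gate_type:  # two-qubit
--             for err in two_qubit_errors:
--                 yield {affected_gates[0]: err}
--         else:  # one-qubit
--             for err in one_qubit_errors:
--                 yield {affected_gates[0]: err}
--         return
--
--     # Recursive case
--     for sub_errors in add_errors_after_gates_recursively(affected_gates[1:], type_mask):
--         gate_type = (type_mask >> affected_gates[0]) & 1
--         if gate_type:
--             for err in two_qubit_errors:
--                 yield sub_errors | {affected_gates[0]: err}
--         else:
--             for err in one_qubit_errors:
--                 yield sub_errors | {affected_gates[0]: err}
-- ===== SOURCE B (Python) =====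
-- def add_errors_after_gates_recursively(affected_gates: list, type_mask: int):
--     one_qubit_errors = ["X"]
--     two_qubit_errors = ["IX", "XI", "XX"]
--     # Iterative Cartesian product: process gates in reversed order so the
--     # first gate varies fastest and dict keys appear in reversed gate order,
--     # exactly as the recursion emits them.
--     combos = [{}]
--     for g in reversed(affected_gates):
--         errors = two_qubit_errors if (type_mask >> g) & 1 else one_qubit_errors
--         combos = [c | {g: e} for c in combos for e in errors]
--     yield from combos
-- ===== Notes on version B (the rewrite author's own statement) =====
-- stated objective: idiomatic
-- what changed: Replaces the generator recursion over the gate list's tail with a single iterative fold over the reversed gate list that builds the Cartesian product of per-gate error choices, yielding the same dicts in the same order.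
import Mathlib
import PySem

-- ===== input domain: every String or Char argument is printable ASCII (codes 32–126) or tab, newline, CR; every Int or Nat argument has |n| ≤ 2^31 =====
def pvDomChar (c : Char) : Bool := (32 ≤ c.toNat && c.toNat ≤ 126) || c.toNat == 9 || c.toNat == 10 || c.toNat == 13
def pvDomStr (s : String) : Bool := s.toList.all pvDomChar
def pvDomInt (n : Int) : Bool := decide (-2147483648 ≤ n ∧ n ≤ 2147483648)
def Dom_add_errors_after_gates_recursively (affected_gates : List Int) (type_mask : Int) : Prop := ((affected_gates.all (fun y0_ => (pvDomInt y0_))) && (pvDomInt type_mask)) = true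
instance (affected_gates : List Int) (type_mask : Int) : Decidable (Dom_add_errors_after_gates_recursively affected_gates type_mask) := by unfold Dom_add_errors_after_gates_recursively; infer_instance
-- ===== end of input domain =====

-- B replaces the generator recursion by one iterative fold over the reversed
-- gate list that builds the whole Cartesian product of per-gate error choices
-- (objective: idiomatic/simpler; same asymptotic cost, same emission order).

-- `d | {k: v}` on a Python dict as an insertion-ordered assoc list:
-- overwrite in place if the key exists, else append (exact).
def pyDictInsert (d : List (Int × String)) (k : Int) (v : String) : List (Int × String) :=
  if d.any (fun p => p.1 == k) then d.map (fun p => if p.1 == k then (k, v) else p)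
  else d ++ [(k, v)]

def one_qubit_errors : List String := ["X"]
def two_qubit_errors : List String := ["IX", "XI", "XX"]

-- ===== PORT A =====
-- A raises RecursionError on []; the [] branch here is outside Pre_.
def add_errors_after_gates_recursively (affected_gates : List Int) (type_mask : Int) : List (List (Int × String)) :=
  match affected_gates with
  | [] => []
  | [g] =>
      if Int.land (type_mask >>> g.toNat) 1 ≠ 0 then
        two_qubit_errors.map (fun err => [(g, err)])
      else
        one_qubit_errors.map (fun err => [(g, err)])
  | g :: h :: t =>
      (add_errors_after_gates_recursively (h :: t) type_mask).flatMap (fun sub =>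
        if Int.land (type_mask >>> g.toNat) 1 ≠ 0 then
          two_qubit_errors.map (fun err => pyDictInsert sub g err)
        else
          one_qubit_errors.map (fun err => pyDictInsert sub g err))

-- ===== PORT B =====
-- `two_qubit_errors if (type_mask >> g) & 1 else one_qubit_errors`
def pvGateErrs (type_mask g : Int) : List String :=
  if Int.land (type_mask >>> g.toNat) 1 ≠ 0 then two_qubit_errors else one_qubit_errors

def add_errors_after_gates_recursively_alt (affected_gates : List Int) (type_mask : Int) : List (List (Int × String)) :=
  affected_gates.reverse.foldl
    (fun combos g =>
      let errors := pvGateErrs type_mask g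
      combos.flatMap (fun c => errors.map (fun e => pyDictInsert c g e)))
    [[]]

-- ===== PRECONDITION & SPEC =====
-- Pre_ excludes exactly the inputs where the Python A raises: the empty gate
-- list (unbounded recursion, RecursionError) and any negative gate
-- (`type_mask >> g` raises ValueError for g < 0).
def Pre_add_errors_after_gates_recursively (affected_gates : List Int) (type_mask : Int) : Prop :=
  affected_gates ≠ [] ∧ ∀ g ∈ affected_gates, 0 ≤ g
instance (affected_gates : List Int) (type_mask : Int) : Decidable (Pre_add_errors_after_gates_recursively affected_gates type_mask) := by unfold Pre_add_errors_after_gates_recursively; infer_instance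

def pvWitness_add_errors_after_gates_recursively : List Int × Int := ([0, 1, 2], 5)

def Spec_add_errors_after_gates_recursively (affected_gates : List Int) (type_mask : Int) (out : List (List (Int × String))) : Prop := out = add_errors_after_gates_recursively_alt affected_gates type_mask
instance (affected_gates : List Int) (type_mask : Int) (out : List (List (Int × String))) : Decidable (Spec_add_errors_after_gates_recursively affected_gates type_mask out) := by unfold Spec_add_errors_after_gates_recursively; infer_instance

-- ===== CLAIM (what is proved, stated in full; the proofs are below) =====
def Claim_equal_add_errors_after_gates_recursively : Prop := ∀ (affected_gates : List Int) (type_mask : Int), Dom_add_errors_after_gates_recursively affected_gates type_mask → Pre_add_errors_after_gates_recursively affected_gates type_mask → Spec_add_errors_after_gates_recursively affected_gates type_mask (add_errors_after_gates_recursively affected_gates type_mask)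

-- ===== LEMMAS AND PROOFS =====

-- B's fold step, named for the proof.
def pvStep (type_mask : Int) (combos : List (List (Int × String))) (g : Int) : List (List (Int × String)) :=
  combos.flatMap (fun c => (pvGateErrs type_mask g).map (fun e => pyDictInsert c g e))

theorem alt_eq_foldl (affected_gates : List Int) (type_mask : Int) :
    add_errors_after_gates_recursively_alt affected_gates type_mask
      = affected_gates.reverse.foldl (pvStep type_mask) [[]] := by
  rfl

theorem a_branch_eq_step (type_mask g : Int) (combos : List (List (Int × String))) :
    combos.flatMap (fun sub =>
      if Int.land (type_mask >>> g.toNat) 1 ≠ 0 then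
        two_qubit_errors.map (fun err => pyDictInsert sub g err)
      else
        one_qubit_errors.map (fun err => pyDictInsert sub g err))
      = pvStep type_mask combos g := by
  unfold pvStep pvGateErrs
  congr 1; funext sub; split <;> rfl

theorem a_eq_foldl (affected_gates : List Int) (type_mask : Int)
    (h : affected_gates ≠ []) :
    add_errors_after_gates_recursively affected_gates type_mask
      = affected_gates.reverse.foldl (pvStep type_mask) [[]] := by
  induction affected_gates with
  | nil => exact absurd rfl h
  | cons g rest ih =>
    cases rest with
    | nil =>
      simp only [add_errors_after_gates_recursively, List.reverse_cons, List.reverse_nil,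
        List.nil_append, List.foldl_cons, List.foldl_nil, pvStep, pvGateErrs, pyDictInsert]
      split <;> simp
    | cons h2 t2 =>
      have hr : (h2 :: t2 : List Int) ≠ [] := by simp
      rw [show (g :: h2 :: t2 : List Int).reverse = (h2 :: t2).reverse ++ [g] by simp,
          List.foldl_append, ← ih hr]
      simp only [add_errors_after_gates_recursively, List.foldl_cons, List.foldl_nil]
      exact a_branch_eq_step type_mask g _

-- ===== VERDICT (by name: the statement is the Claim_ definition above) =====
theorem add_errors_after_gates_recursively_spec : Claim_equal_add_errors_after_gates_recursively := by
  intro gates m _ hpre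
  unfold Spec_add_errors_after_gates_recursively
  rw [alt_eq_foldl, a_eq_foldl gates m hpre.1]
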